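-- pv_equiv track=rewrite | github.com/jrucl2d/Algorithm | 문제집/구현/17276.py | turn_right
-- ===== SOURCE A (Python) =====
-- def turn_right(arr):
--     n = len(arr)
--     zoo = []
--     gaun = []
--     boo = []
--     gaha = []
--     for i in range(n):
--         for j in range(n):
--             if i == j:
--                 zoo.append(arr[i][j])
--             if j == n // 2:
--                 gaun.append(arr[i][j])
--             if j == n - i - 1:
--                 boo.append(arr[i][j])
--             if i == n // 2:
--                 gaha.append(arr[i][j])
--
--     for i in range(n):
--         arr[i][n // 2] = zoo[i]
--         arr[i][n - i - 1] = gaun[i]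
--         arr[n // 2][n - i - 1] = boo[i]
--         arr[i][i] = gaha[i]
--     return arr
-- ===== SOURCE B (Python) =====
-- def turn_right(arr):
--     n = len(arr)
--     m = n // 2
--     zoo = [arr[i][i] for i in range(n)]
--     gaun = [arr[i][m] for i in range(n)]
--     boo = [arr[i][n - i - 1] for i in range(n)]
--     gaha = [arr[m][j] for j in range(n)]
--     for i in range(n):
--         arr[i][m] = zoo[i]
--         arr[i][n - i - 1] = gaun[i]
--         arr[m][n - i - 1] = boo[i]
--         arr[i][i] = gaha[i]
--     return arr
-- ===== Notes on version B (the rewrite author's own statement) =====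
-- stated objective: faster
-- what changed: B reads the four affected lines (main diagonal, middle column, anti-diagonal, middle row) by direct indexing in four O(n) comprehensions instead of A's nested O(n^2) scan of every cell with four membership tests, keeping the same in-place write-back loop.
import Mathlib
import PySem

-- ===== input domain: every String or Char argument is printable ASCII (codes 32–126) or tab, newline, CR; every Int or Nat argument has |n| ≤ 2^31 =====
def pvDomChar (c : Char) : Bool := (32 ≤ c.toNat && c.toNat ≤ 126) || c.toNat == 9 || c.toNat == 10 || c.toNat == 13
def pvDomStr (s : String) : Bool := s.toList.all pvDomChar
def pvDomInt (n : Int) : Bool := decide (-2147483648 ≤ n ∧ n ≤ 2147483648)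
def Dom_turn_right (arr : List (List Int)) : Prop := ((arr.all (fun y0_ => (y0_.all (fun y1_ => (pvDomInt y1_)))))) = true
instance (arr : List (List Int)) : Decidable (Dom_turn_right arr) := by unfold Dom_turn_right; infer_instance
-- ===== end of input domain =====

-- B gathers the four lines (main diagonal, middle column, anti-diagonal, middle row) by direct
-- indexing in O(n) instead of A's O(n^2) scan of every cell; the in-place write-back loop is the
-- same, so B mutates arr exactly as A does (the theorem is about the return value).

-- arr[i][j] read with a default (only evaluated in-range under Pre_)
def pvCell (arr : List (List Int)) (i j : Int) : Int :=
  PySem.List.pyGetD (PySem.List.pyGetD arr i []) j 0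

-- 'a[r][c] = v' on the current matrix (Python's in-place row assignment)
def pvSet2 (a : List (List Int)) (r c : Int) (v : Int) : List (List Int) :=
  PySem.List.pySetD a r (PySem.List.pySetD (PySem.List.pyGetD a r []) c v)

-- ===== PORT A =====
def turn_right (arr : List (List Int)) : List (List Int) :=
  let n : Int := arr.length
  let res :=
    (PySem.List.pyRange 0 n 1).foldl (fun s i =>
      (PySem.List.pyRange 0 n 1).foldl
        (fun (s : List Int × List Int × List Int × List Int) j =>
          ((if i = j then s.1 ++ [pvCell arr i j] else s.1),
           (if j = PySem.Int.floordiv n 2 then s.2.1 ++ [pvCell arr i j] else s.2.1),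
           (if j = n - i - 1 then s.2.2.1 ++ [pvCell arr i j] else s.2.2.1),
           (if i = PySem.Int.floordiv n 2 then s.2.2.2 ++ [pvCell arr i j] else s.2.2.2))) s)
      (([] : List Int), ([] : List Int), ([] : List Int), ([] : List Int))
  let zoo := res.1
  let gaun := res.2.1
  let boo := res.2.2.1
  let gaha := res.2.2.2
  (PySem.List.pyRange 0 n 1).foldl (fun a i =>
      pvSet2 (pvSet2 (pvSet2 (pvSet2 a i (PySem.Int.floordiv n 2) (PySem.List.pyGetD zoo i 0))
          i (n - i - 1) (PySem.List.pyGetD gaun i 0))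
          (PySem.Int.floordiv n 2) (n - i - 1) (PySem.List.pyGetD boo i 0))
          i i (PySem.List.pyGetD gaha i 0)) arr

-- ===== PORT B =====
def turn_right_alt (arr : List (List Int)) : List (List Int) :=
  let n : Int := arr.length
  let m := PySem.Int.floordiv n 2
  let zoo := (PySem.List.pyRange 0 n 1).map (fun i => pvCell arr i i)
  let gaun := (PySem.List.pyRange 0 n 1).map (fun i => pvCell arr i m)
  let boo := (PySem.List.pyRange 0 n 1).map (fun i => pvCell arr i (n - i - 1))
  let gaha := (PySem.List.pyRange 0 n 1).map (fun j => pvCell arr m j)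
  (PySem.List.pyRange 0 n 1).foldl (fun a i =>
      pvSet2 (pvSet2 (pvSet2 (pvSet2 a i m (PySem.List.pyGetD zoo i 0))
          i (n - i - 1) (PySem.List.pyGetD gaun i 0))
          m (n - i - 1) (PySem.List.pyGetD boo i 0))
          i i (PySem.List.pyGetD gaha i 0)) arr

-- ===== PRECONDITION & SPEC =====
-- A (and B) raise IndexError when some row is shorter than the number of rows; Pre_ admits
-- exactly the inputs where every row has at least len(arr) entries (A returns there).
def Pre_turn_right (arr : List (List Int)) : Prop :=
  ∀ row ∈ arr, arr.length ≤ row.length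
instance (arr : List (List Int)) : Decidable (Pre_turn_right arr) := by
  unfold Pre_turn_right; infer_instance
def pvWitness_turn_right : List (List Int) := [[1, 2], [3, 4]]

def Spec_turn_right (arr : List (List Int)) (out : List (List Int)) : Prop := out = turn_right_alt arr
instance (arr : List (List Int)) (out : List (List Int)) : Decidable (Spec_turn_right arr out) := by unfold Spec_turn_right; infer_instance

-- ===== CLAIM (what is proved, stated in full; the proofs are below) =====
def Claim_equal_turn_right : Prop := ∀ (arr : List (List Int)), Dom_turn_right arr → Pre_turn_right arr → Spec_turn_right arr (turn_right arr)

-- ===== LEMMAS AND PROOFS =====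

-- the range [0,n) filtered to the single index i
theorem pv_filter_eq_left {i n : Int} (h0 : 0 ≤ i) (hn : i < n) :
    (PySem.List.pyRange 0 n 1).filter (fun j => decide (i = j)) = [i] := by
  rw [PySem.List.pyRange_one_append 0 i n h0 (le_of_lt hn),
      PySem.List.pyRange_one_cons hn, List.filter_append, List.filter_cons]
  have h1 : (PySem.List.pyRange 0 i 1).filter (fun j => decide (i = j)) = [] := by
    refine List.filter_eq_nil_iff.mpr ?_
    intro a ha
    have := PySem.List.mem_pyRange_one.mp ha
    simp; omega
  have h2 : (PySem.List.pyRange (i + 1) n 1).filter (fun j => decide (i = j)) = [] := by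
    refine List.filter_eq_nil_iff.mpr ?_
    intro a ha
    have := PySem.List.mem_pyRange_one.mp ha
    simp; omega
  simp [h1, h2]

theorem pv_filter_eq_right {c n : Int} (h0 : 0 ≤ c) (hn : c < n) :
    (PySem.List.pyRange 0 n 1).filter (fun j => decide (j = c)) = [c] := by
  have := pv_filter_eq_left h0 hn
  rw [show (fun j => decide (j = c)) = (fun j => decide (c = j)) by
        funext j; simp [eq_comm]]
  exact this

-- a flatMap over [0,n) that is empty except at i = m
theorem pv_flatMap_ite {m n : Int} (L : Int → List Int) (h0 : 0 ≤ m) (hn : m < n) :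
    (PySem.List.pyRange 0 n 1).flatMap (fun i => if i = m then L i else []) = L m := by
  rw [PySem.List.pyRange_one_append 0 m n h0 (le_of_lt hn),
      PySem.List.pyRange_one_cons hn, List.flatMap_append, List.flatMap_cons]
  have h1 : (PySem.List.pyRange 0 m 1).flatMap (fun i => if i = m then L i else []) = [] := by
    refine List.flatMap_eq_nil_iff.mpr ?_
    intro a ha
    have := PySem.List.mem_pyRange_one.mp ha
    simp; omega
  have h2 : (PySem.List.pyRange (m + 1) n 1).flatMap (fun i => if i = m then L i else []) = [] := by
    refine List.flatMap_eq_nil_iff.mpr ?_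
    intro a ha
    have := PySem.List.mem_pyRange_one.mp ha
    simp; omega
  simp [h1, h2]

theorem pv_inner (arr : List (List Int)) (n m i : Int)
    (h0 : 0 ≤ i) (hn : i < n) (hm0 : 0 ≤ m) (hmn : m < n)
    (s : List Int × List Int × List Int × List Int) :
    (PySem.List.pyRange 0 n 1).foldl
      (fun (s : List Int × List Int × List Int × List Int) j =>
        ((if i = j then s.1 ++ [pvCell arr i j] else s.1),
         (if j = m then s.2.1 ++ [pvCell arr i j] else s.2.1),
         (if j = n - i - 1 then s.2.2.1 ++ [pvCell arr i j] else s.2.2.1),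
         (if i = m then s.2.2.2 ++ [pvCell arr i j] else s.2.2.2))) s
    = (s.1 ++ [pvCell arr i i], s.2.1 ++ [pvCell arr i m],
       s.2.2.1 ++ [pvCell arr i (n - i - 1)],
       s.2.2.2 ++ (if i = m then (PySem.List.pyRange 0 n 1).map (pvCell arr i) else [])) := by
  obtain ⟨z, g, b, h⟩ := s
  rw [PySem.List.foldl_prod_mk (f := fun acc j => if i = j then acc ++ [pvCell arr i j] else acc)
        (g := fun (s : List Int × List Int × List Int) j =>
          ((if j = m then s.1 ++ [pvCell arr i j] else s.1),
           (if j = n - i - 1 then s.2.1 ++ [pvCell arr i j] else s.2.1),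
           (if i = m then s.2.2 ++ [pvCell arr i j] else s.2.2)))]
  rw [PySem.List.foldl_prod_mk (f := fun acc j => if j = m then acc ++ [pvCell arr i j] else acc)
        (g := fun (s : List Int × List Int) j =>
          ((if j = n - i - 1 then s.1 ++ [pvCell arr i j] else s.1),
           (if i = m then s.2 ++ [pvCell arr i j] else s.2)))]
  rw [PySem.List.foldl_prod_mk (f := fun acc j => if j = n - i - 1 then acc ++ [pvCell arr i j] else acc)
        (g := fun acc j => if i = m then acc ++ [pvCell arr i j] else acc)]
  refine Prod.ext ?_ (Prod.ext ?_ (Prod.ext ?_ ?_)) <;> simp only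
  · have := PySem.List.foldl_append_if (fun j => decide (i = j)) (pvCell arr i) (PySem.List.pyRange 0 n 1) z
    simp only [decide_eq_true_eq] at this
    rw [this, pv_filter_eq_left h0 hn]; simp
  · have := PySem.List.foldl_append_if (fun j => decide (j = m)) (pvCell arr i) (PySem.List.pyRange 0 n 1) g
    simp only [decide_eq_true_eq] at this
    rw [this, pv_filter_eq_right hm0 hmn]; simp
  · have := PySem.List.foldl_append_if (fun j => decide (j = n - i - 1)) (pvCell arr i) (PySem.List.pyRange 0 n 1) b
    simp only [decide_eq_true_eq] at this
    rw [this, pv_filter_eq_right (by omega) (by omega)]; simp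
  · by_cases hi : i = m
    · simp only [hi, if_true]
      exact PySem.List.foldl_append_singleton_eq_map (pvCell arr m) _ h
    · simp [hi]

theorem pv_gather (arr : List (List Int)) (n m : Int) (hm0 : 0 ≤ m) (hmn : m < n) :
    (PySem.List.pyRange 0 n 1).foldl (fun s i =>
      (PySem.List.pyRange 0 n 1).foldl
        (fun (s : List Int × List Int × List Int × List Int) j =>
          ((if i = j then s.1 ++ [pvCell arr i j] else s.1),
           (if j = m then s.2.1 ++ [pvCell arr i j] else s.2.1),
           (if j = n - i - 1 then s.2.2.1 ++ [pvCell arr i j] else s.2.2.1),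
           (if i = m then s.2.2.2 ++ [pvCell arr i j] else s.2.2.2))) s)
      (([] : List Int), ([] : List Int), ([] : List Int), ([] : List Int))
    = ((PySem.List.pyRange 0 n 1).map (fun i => pvCell arr i i),
       (PySem.List.pyRange 0 n 1).map (fun i => pvCell arr i m),
       (PySem.List.pyRange 0 n 1).map (fun i => pvCell arr i (n - i - 1)),
       (PySem.List.pyRange 0 n 1).map (fun j => pvCell arr m j)) := by
  rw [PySem.List.foldl_congr_mem (PySem.List.pyRange 0 n 1)
        (fun s i =>
          (PySem.List.pyRange 0 n 1).foldl
            (fun (s : List Int × List Int × List Int × List Int) j =>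
              ((if i = j then s.1 ++ [pvCell arr i j] else s.1),
               (if j = m then s.2.1 ++ [pvCell arr i j] else s.2.1),
               (if j = n - i - 1 then s.2.2.1 ++ [pvCell arr i j] else s.2.2.1),
               (if i = m then s.2.2.2 ++ [pvCell arr i j] else s.2.2.2))) s)
        (fun (s : List Int × List Int × List Int × List Int) i =>
          (s.1 ++ [pvCell arr i i], s.2.1 ++ [pvCell arr i m],
           s.2.2.1 ++ [pvCell arr i (n - i - 1)],
           s.2.2.2 ++ (if i = m then (PySem.List.pyRange 0 n 1).map (pvCell arr i) else [])))
        (([] : List Int), ([] : List Int), ([] : List Int), ([] : List Int))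
        (by intro acc i hi
            have hb := PySem.List.mem_pyRange_one.mp hi
            exact pv_inner arr n m i hb.1 hb.2 hm0 hmn acc)]
  rw [PySem.List.foldl_prod_mk (f := fun acc i => acc ++ [pvCell arr i i])
        (g := fun (s : List Int × List Int × List Int) i =>
          (s.1 ++ [pvCell arr i m], s.2.1 ++ [pvCell arr i (n - i - 1)],
           s.2.2 ++ (if i = m then (PySem.List.pyRange 0 n 1).map (pvCell arr i) else [])))]
  rw [PySem.List.foldl_prod_mk (f := fun acc i => acc ++ [pvCell arr i m])
        (g := fun (s : List Int × List Int) i =>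
          (s.1 ++ [pvCell arr i (n - i - 1)],
           s.2 ++ (if i = m then (PySem.List.pyRange 0 n 1).map (pvCell arr i) else [])))]
  rw [PySem.List.foldl_prod_mk (f := fun acc i => acc ++ [pvCell arr i (n - i - 1)])
        (g := fun acc i => acc ++ (if i = m then (PySem.List.pyRange 0 n 1).map (pvCell arr i) else []))]
  rw [PySem.List.foldl_append_singleton_eq_map, PySem.List.foldl_append_singleton_eq_map,
      PySem.List.foldl_append_singleton_eq_map,
      PySem.List.foldl_append_eq_flatMap
        (g := fun i => if i = m then (PySem.List.pyRange 0 n 1).map (pvCell arr i) else []),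
      pv_flatMap_ite _ hm0 hmn]
  simp

-- ===== VERDICT (by name: the statement is the Claim_ definition above) =====
theorem turn_right_spec : Claim_equal_turn_right := by
  intro arr _ _
  unfold Spec_turn_right turn_right turn_right_alt
  cases arr with
  | nil =>
    simp [PySem.List.pyRange_one_eq_nil (by norm_num : (0 : Int) ≤ 0)]
  | cons r t =>
    dsimp only
    have hn : (1 : Int) ≤ ((r :: t).length : Int) := by
      simp
    have hdiv : PySem.Int.floordiv ((r :: t).length : Int) 2 = ((r :: t).length : Int) / 2 := by
      simp [PySem.Int.floordiv, Int.fdiv_eq_ediv]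
    have hm0 : 0 ≤ PySem.Int.floordiv ((r :: t).length : Int) 2 := by rw [hdiv]; omega
    have hmn : PySem.Int.floordiv ((r :: t).length : Int) 2 < ((r :: t).length : Int) := by
      rw [hdiv]; omega
    rw [pv_gather (r :: t) ((r :: t).length : Int) (PySem.Int.floordiv ((r :: t).length : Int) 2) hm0 hmn]
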